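-- pv_equiv track=rewrite | github.com/LalitMaganti/syntaqlite | python/syntaqlite/sqlite_extractor/grammar_build.py | _strip_action_blocks
-- ===== SOURCE A (Python) =====
-- def _strip_action_blocks(content: str) -> str:
--     """Strip { ... } action blocks from grammar content (brace-aware).
--
--     This produces bare rules suitable for lemon -g, which doesn't need
--     action code.
--     """
--     result = []
--     i = 0
--     while i < len(content):
--         if content[i] == '{':
--             # Skip to matching close brace
--             depth = 1
--             i += 1
--             while i < len(content) and depth > 0:
--                 if content[i] == '{':
--                     depth += 1
--                 elif content[i] == '}':
--                     depth -= 1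
--                 i += 1
--         else:
--             result.append(content[i])
--             i += 1
--     return ''.join(result)
-- ===== SOURCE B (Python) =====
-- def _strip_action_blocks(content: str) -> str:
--     """Strip { ... } action blocks: one flat pass with a running depth counter."""
--     result = []
--     depth = 0
--     for ch in content:
--         if ch == '{':
--             depth += 1
--         elif ch == '}':
--             if depth > 0:
--                 depth -= 1
--             else:
--                 result.append(ch)
--         elif depth == 0:
--             result.append(ch)
--     return ''.join(result)
-- ===== Notes on version B (the rewrite author's own statement) =====
-- stated objective: simpler
-- what changed: Replaced the outer index loop with a nested skip-to-matching-brace while-loop by one flat pass over the characters maintaining a persistent depth counter.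
import Mathlib
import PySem

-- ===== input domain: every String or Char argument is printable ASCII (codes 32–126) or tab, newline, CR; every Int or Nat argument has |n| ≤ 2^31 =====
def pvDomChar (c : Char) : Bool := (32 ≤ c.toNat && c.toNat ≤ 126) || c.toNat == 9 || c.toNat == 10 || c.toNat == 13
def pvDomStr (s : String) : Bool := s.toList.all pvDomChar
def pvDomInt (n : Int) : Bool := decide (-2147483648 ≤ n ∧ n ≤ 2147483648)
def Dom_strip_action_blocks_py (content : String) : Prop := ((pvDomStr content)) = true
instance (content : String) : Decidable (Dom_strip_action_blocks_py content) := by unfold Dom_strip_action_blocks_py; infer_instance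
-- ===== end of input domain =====

-- B replaces A's outer loop with nested brace-skipping inner loop by one flat pass with a running depth counter (simpler decomposition, same O(n) cost).

-- ===== PORT A =====
-- inner while-loop: after seeing '{' at depth 1, consume chars adjusting depth until it hits 0 or input ends
def pvSkipA : List Char → Nat → List Char
  | [], _ => []
  | c :: cs, d =>
    if d = 0 then c :: cs
    else pvSkipA cs (if c = '{' then d + 1 else if c = '}' then d - 1 else d)

theorem pvSkipA_length (cs : List Char) (d : Nat) : (pvSkipA cs d).length ≤ cs.length := by
  induction cs generalizing d with
  | nil => simp [pvSkipA]
  | cons c cs ih =>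
    simp only [pvSkipA]
    split
    · simp
    · exact Nat.le_trans (ih _) (Nat.le_succ _)

-- outer while-loop of A
def pvGoA : List Char → List Char
  | [] => []
  | c :: cs =>
    if c = '{' then pvGoA (pvSkipA cs 1)
    else c :: pvGoA cs
termination_by cs => cs.length
decreasing_by
  · exact Nat.lt_succ_of_le (pvSkipA_length cs 1)
  · simp

def strip_action_blocks_py (content : String) : String :=
  String.ofList (pvGoA content.toList)

-- ===== PORT B =====
-- B's single flat loop over the characters with a persistent depth counter
def pvGoB : List Char → Nat → List Char
  | [], _ => []
  | c :: cs, d =>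
    if c = '{' then pvGoB cs (d + 1)
    else if c = '}' then
      if d > 0 then pvGoB cs (d - 1) else c :: pvGoB cs d
    else if d = 0 then c :: pvGoB cs d
    else pvGoB cs d

def strip_action_blocks_py_alt (content : String) : String :=
  String.ofList (pvGoB content.toList 0)

-- ===== PRECONDITION & SPEC =====
def Spec_strip_action_blocks_py (content : String) (out : String) : Prop := out = strip_action_blocks_py_alt content
instance (content : String) (out : String) : Decidable (Spec_strip_action_blocks_py content out) := by unfold Spec_strip_action_blocks_py; infer_instance

-- ===== CLAIM (what is proved, stated in full; the proofs are below) =====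
def Claim_equal_strip_action_blocks_py : Prop := ∀ (content : String), Dom_strip_action_blocks_py content → Spec_strip_action_blocks_py content (strip_action_blocks_py content)

-- ===== LEMMAS AND PROOFS =====

-- while B is inside a block (depth d+1), it drops exactly the chars A's inner skip loop consumes
theorem pvGoB_skip (cs : List Char) (d : Nat) :
    pvGoB cs (d + 1) = pvGoB (pvSkipA cs (d + 1)) 0 := by
  induction cs generalizing d with
  | nil => simp [pvGoB, pvSkipA]
  | cons c cs ih =>
    by_cases h1 : c = '{'
    · simp only [pvGoB, pvSkipA, h1, if_pos, Nat.succ_ne_zero, if_neg, if_true]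
      simpa using ih (d + 1)
    · by_cases h2 : c = '}'
      · simp only [pvGoB, pvSkipA, h1, h2, if_neg, if_pos, Nat.succ_ne_zero, if_false, if_true,
          Nat.succ_sub_one, gt_iff_lt, Nat.succ_pos]
        cases d with
        | zero =>
          cases cs with
          | nil => simp [pvGoB, pvSkipA]
          | cons x xs => simp [pvSkipA]
        | succ e => simpa using ih e
      · simp only [pvGoB, pvSkipA, h1, h2, if_neg, Nat.succ_ne_zero, if_false]
        simpa using ih d

-- A's outer loop equals B's flat loop at depth 0 (strong induction on length, since pvGoA recurses through pvSkipA)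
theorem pvGoA_eq_pvGoB (n : Nat) : ∀ cs : List Char, cs.length ≤ n → pvGoA cs = pvGoB cs 0 := by
  induction n with
  | zero =>
    intro cs h
    have : cs = [] := List.eq_nil_of_length_eq_zero (Nat.le_zero.mp h)
    subst this; simp [pvGoA, pvGoB]
  | succ n ih =>
    intro cs h
    cases cs with
    | nil => simp [pvGoA, pvGoB]
    | cons c cs =>
      by_cases h1 : c = '{'
      · rw [show pvGoA (c :: cs) = pvGoA (pvSkipA cs 1) from by rw [pvGoA]; simp [h1]]
        rw [ih _ (Nat.le_trans (pvSkipA_length cs 1) (Nat.le_of_succ_le_succ h))]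
        simp only [pvGoB, h1, if_pos]
        exact (pvGoB_skip cs 0).symm
      · rw [show pvGoA (c :: cs) = c :: pvGoA cs from by rw [pvGoA]; simp [h1]]
        rw [ih _ (Nat.le_of_succ_le_succ h)]
        by_cases h2 : c = '}'
        · simp [pvGoB, h1, h2]
        · simp [pvGoB, h1, h2]

-- ===== VERDICT (by name: the statement is the Claim_ definition above) =====
theorem strip_action_blocks_py_spec : Claim_equal_strip_action_blocks_py := by
  intro content _
  unfold Spec_strip_action_blocks_py strip_action_blocks_py strip_action_blocks_py_alt
  rw [pvGoA_eq_pvGoB content.toList.length _ (Nat.le_refl _)]
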